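-- pv_equiv track=rewrite | github.com/wilmurillo-ai/Design-Assistant | .skills/openclaw-skills/skills/richard-collab/baize-task-bot/skill.py | _ie_match_tasks
-- ===== SOURCE A (Python) =====
-- from typing import Optional
--
-- def _ie_match_tasks(filters: dict, account: Optional[str], tasks: list) -> list:
--     """Filter local task records by name filters and account."""
--     result = tasks
--     if account:
--         result = [t for t in result if t.get("account", "").lower() == account.lower()]
--     for s in filters.get("contain", []):
--         result = [t for t in result if s in t.get("taskName", "")]
--     for s in filters.get("not_contain", []):
--         result = [t for t in result if s not in t.get("taskName", "")]
--     for s in filters.get("equal", []):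
--         result = [t for t in result if t.get("taskName", "") == s]
--     return result
-- ===== SOURCE B (Python) =====
-- def _ie_match_tasks(filters: dict, account, tasks: list) -> list:
--     """Filter local task records by name filters and account (single pass)."""
--     contain = filters.get("contain", [])
--     not_contain = filters.get("not_contain", [])
--     equal = filters.get("equal", [])
--
--     def ok(t):
--         if account and t.get("account", "").lower() != account.lower():
--             return False
--         name = t.get("taskName", "")
--         return (all(s in name for s in contain)
--                 and all(s not in name for s in not_contain)
--                 and all(name == s for s in equal))
--
--     return [t for t in tasks if ok(t)]
-- ===== Notes on version B (the rewrite author's own statement) =====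
-- stated objective: simpler
-- what changed: Replaced A's four sequential list-rebuilding passes (one filtered copy per account check and per filter string) with one predicate over a task and a single comprehension over the input list.
import Mathlib
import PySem

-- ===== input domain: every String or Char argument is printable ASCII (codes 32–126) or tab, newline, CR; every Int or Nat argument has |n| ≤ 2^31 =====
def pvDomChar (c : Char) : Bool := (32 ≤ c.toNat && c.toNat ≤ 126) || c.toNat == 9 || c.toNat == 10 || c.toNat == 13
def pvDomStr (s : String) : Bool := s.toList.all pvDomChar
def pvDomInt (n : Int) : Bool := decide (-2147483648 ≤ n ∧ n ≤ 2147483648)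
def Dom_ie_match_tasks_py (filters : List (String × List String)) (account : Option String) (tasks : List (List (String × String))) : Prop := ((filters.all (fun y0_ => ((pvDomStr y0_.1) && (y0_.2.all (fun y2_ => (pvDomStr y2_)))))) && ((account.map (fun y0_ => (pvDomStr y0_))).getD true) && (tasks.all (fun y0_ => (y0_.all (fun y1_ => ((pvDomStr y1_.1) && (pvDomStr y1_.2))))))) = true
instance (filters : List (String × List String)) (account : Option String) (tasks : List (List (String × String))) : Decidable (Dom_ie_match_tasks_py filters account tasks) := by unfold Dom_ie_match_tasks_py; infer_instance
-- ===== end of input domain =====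

-- B replaces A's four sequential filtered copies by one predicate and a single pass; objective: simpler.

-- dict.get(k, dflt) on an association list: first match or the default
def pvDictGetD {α : Type} (d : List (String × α)) (k : String) (dflt : α) : α :=
  ((d.find? (fun p => p.1 == k)).map (·.2)).getD dflt

-- ===== PORT A =====
def ie_match_tasks_py (filters : List (String × List String)) (account : Option String) (tasks : List (List (String × String))) : List (List (String × String)) :=
  let result := tasks
  let result :=
    match account with
    | none => result
    | some a =>
      if a = "" then result   -- '' is falsy: "if account" skips the pass
      else result.filter (fun t => PySem.Str.lower (pvDictGetD t "account" "") == PySem.Str.lower a)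
  let result := (pvDictGetD filters "contain" []).foldl
    (fun r s => r.filter (fun t => PySem.Str.isIn s (pvDictGetD t "taskName" ""))) result
  let result := (pvDictGetD filters "not_contain" []).foldl
    (fun r s => r.filter (fun t => !PySem.Str.isIn s (pvDictGetD t "taskName" ""))) result
  let result := (pvDictGetD filters "equal" []).foldl
    (fun r s => r.filter (fun t => pvDictGetD t "taskName" "" == s)) result
  result

-- ===== PORT B =====
def ie_match_tasks_py_ok (filters : List (String × List String)) (account : Option String) (t : List (String × String)) : Bool :=
  (match account with
   | none => true
   | some a =>
     a = "" || PySem.Str.lower (pvDictGetD t "account" "") == PySem.Str.lower a) &&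
  ((pvDictGetD filters "contain" []).all (fun s => PySem.Str.isIn s (pvDictGetD t "taskName" ""))) &&
  ((pvDictGetD filters "not_contain" []).all (fun s => !PySem.Str.isIn s (pvDictGetD t "taskName" ""))) &&
  ((pvDictGetD filters "equal" []).all (fun s => pvDictGetD t "taskName" "" == s))

def ie_match_tasks_py_alt (filters : List (String × List String)) (account : Option String) (tasks : List (List (String × String))) : List (List (String × String)) :=
  tasks.filter (ie_match_tasks_py_ok filters account)

-- ===== PRECONDITION & SPEC =====
def Spec_ie_match_tasks_py (filters : List (String × List String)) (account : Option String) (tasks : List (List (String × String))) (out : List (List (String × String))) : Prop := out = ie_match_tasks_py_alt filters account tasks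
instance (filters : List (String × List String)) (account : Option String) (tasks : List (List (String × String))) (out : List (List (String × String))) : Decidable (Spec_ie_match_tasks_py filters account tasks out) := by unfold Spec_ie_match_tasks_py; infer_instance

-- ===== CLAIM (what is proved, stated in full; the proofs are below) =====
def Claim_equal_ie_match_tasks_py : Prop := ∀ (filters : List (String × List String)) (account : Option String) (tasks : List (List (String × String))), Dom_ie_match_tasks_py filters account tasks → Spec_ie_match_tasks_py filters account tasks (ie_match_tasks_py filters account tasks)

-- ===== LEMMAS AND PROOFS =====

-- A's per-string filtering fold over a list of filter strings is one filter by List.all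
theorem foldl_filter_eq_filter_all {α β : Type} (g : β → α → Bool) (ss : List β) (r : List α) :
    ss.foldl (fun r s => r.filter (g s)) r = r.filter (fun t => ss.all (fun s => g s t)) := by
  induction ss generalizing r with
  | nil => simp
  | cons s ss ih =>
      simp only [List.foldl_cons, ih, List.filter_filter, List.all_cons]
      exact List.filter_congr (fun t _ => by simp [Bool.and_comm])

theorem ie_match_tasks_py_eq_alt (filters : List (String × List String)) (account : Option String) (tasks : List (List (String × String))) :
    ie_match_tasks_py filters account tasks = ie_match_tasks_py_alt filters account tasks := by
  unfold ie_match_tasks_py ie_match_tasks_py_alt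
  simp only [foldl_filter_eq_filter_all]
  cases account with
  | none =>
      simp only [List.filter_filter]
      exact List.filter_congr (fun t _ => by
        simp [ie_match_tasks_py_ok, Bool.and_comm])
  | some a =>
      by_cases ha : a = ""
      · simp only [ha, if_pos, List.filter_filter]
        exact List.filter_congr (fun t _ => by
          simp [ie_match_tasks_py_ok, Bool.and_comm])
      · simp only [if_neg ha, List.filter_filter]
        exact List.filter_congr (fun t _ => by
          simp [ie_match_tasks_py_ok, ha, Bool.and_assoc, Bool.and_comm])

-- ===== VERDICT (by name: the statement is the Claim_ definition above) =====
theorem ie_match_tasks_py_spec : Claim_equal_ie_match_tasks_py := by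
  intro filters account tasks _
  exact ie_match_tasks_py_eq_alt filters account tasks
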